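-- pv_equiv track=rewrite | github.com/micahcochran/cs662-qa-land-dev-law-sys | code_snippets/edit_distance.py | get_sub_counts
-- ===== SOURCE A (Python) =====
-- import collections
--
-- def get_sub_counts(token1, token2):
--     counts = []
--     for t1 in range(1, len(token1) + 1):
--         for t2 in range(1, len(token2) + 1):
--             if (token1[t1-1] != token2[t2-1]):
--                 counts.append(token1[t1-1])
--     counter=collections.Counter(counts)
--     return dict(counter)
-- ===== SOURCE B (Python) =====
-- import collections
--
-- def get_sub_counts(token1, token2):
--     freq2 = collections.Counter(token2)
--     n2 = len(token2)
--     result = {}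
--     for c in token1:
--         m = n2 - freq2[c]
--         if m > 0:
--             result[c] = result.get(c, 0) + m
--     return result
-- ===== Notes on version B (the rewrite author's own statement) =====
-- stated objective: faster
-- what changed: B replaces the nested position-pair loops and the Counter over the appended list by a single Counter of token2 plus one pass over token1 adding len(token2)-freq2[c] per character, preserving first-occurrence key order.
import Mathlib
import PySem

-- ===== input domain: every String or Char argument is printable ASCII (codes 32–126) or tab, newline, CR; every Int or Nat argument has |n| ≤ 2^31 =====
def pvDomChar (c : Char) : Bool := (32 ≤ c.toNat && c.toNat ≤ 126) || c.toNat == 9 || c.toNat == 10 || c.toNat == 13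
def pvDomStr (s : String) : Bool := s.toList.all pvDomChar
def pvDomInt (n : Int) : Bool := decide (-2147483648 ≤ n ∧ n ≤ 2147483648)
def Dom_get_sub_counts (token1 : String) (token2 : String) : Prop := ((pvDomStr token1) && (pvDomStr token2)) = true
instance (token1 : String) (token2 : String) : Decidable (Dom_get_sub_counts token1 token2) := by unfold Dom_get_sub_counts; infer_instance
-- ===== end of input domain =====

-- B replaces A's nested O(n*m) position-pair loops (and the Counter over the appended
-- list) by one Counter of token2 plus a single pass over token1, same result and key order.

-- ===== PORT A =====
-- the indices t1-1 / t2-1 are always in range here, so pyGetD with a dummy default is exact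
def get_sub_counts (token1 : String) (token2 : String) : List (String × Int) :=
  let l1 := token1.toList
  let l2 := token2.toList
  let counts : List Char :=
    (PySem.List.pyRange 1 ((l1.length : Int) + 1)).foldl
      (fun acc t1 =>
        (PySem.List.pyRange 1 ((l2.length : Int) + 1)).foldl
          (fun acc2 t2 =>
            if PySem.List.pyGetD l1 (t1 - 1) ' ' ≠ PySem.List.pyGetD l2 (t2 - 1) ' '
            then acc2 ++ [PySem.List.pyGetD l1 (t1 - 1) ' ']
            else acc2)
          acc)
      []
  let counter := PySem.Dict.counter counts
  counter.items.map (fun kv => (String.mk [kv.1], kv.2))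

-- ===== PORT B =====
def get_sub_counts_alt (token1 : String) (token2 : String) : List (String × Int) :=
  let freq2 := PySem.Dict.counter token2.toList
  let n2 : Int := (token2.toList.length : Int)
  let result := token1.toList.foldl
    (fun d c =>
      let m := n2 - freq2.getD c 0
      if 0 < m then d.insert c (d.getD c 0 + m) else d)
    PySem.Dict.empty
  result.items.map (fun kv => (String.mk [kv.1], kv.2))

-- ===== PRECONDITION & SPEC =====
def Spec_get_sub_counts (token1 : String) (token2 : String) (out : List (String × Int)) : Prop := out = get_sub_counts_alt token1 token2
instance (token1 : String) (token2 : String) (out : List (String × Int)) : Decidable (Spec_get_sub_counts token1 token2 out) := by unfold Spec_get_sub_counts; infer_instance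

-- ===== CLAIM (what is proved, stated in full; the proofs are below) =====
def Claim_equal_get_sub_counts : Prop := ∀ (token1 : String) (token2 : String), Dom_get_sub_counts token1 token2 → Spec_get_sub_counts token1 token2 (get_sub_counts token1 token2)

-- ===== LEMMAS AND PROOFS =====

lemma pyRange_one_shift (n : Nat) :
    PySem.List.pyRange 1 ((n : Int) + 1) = (PySem.List.pyRange 0 (n : Int)).map (· + 1) := by
  induction n with
  | zero => rfl
  | succ n ih =>
      have h1 : ((n + 1 : Nat) : Int) + 1 = ((n : Int) + 1) + 1 := by push_cast; ring
      rw [h1, PySem.List.pyRange_one_succ_right (by omega),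
          show ((n + 1 : Nat) : Int) = (n : Int) + 1 by push_cast; ring,
          PySem.List.pyRange_one_succ_right (a := 0) (b := (n : Int)) (by omega),
          List.map_append, ih]
      simp

lemma range1_map_get {α : Type} (l : List α) (d : α) :
    (PySem.List.pyRange 1 ((l.length : Int) + 1)).map (fun t => PySem.List.pyGetD l (t - 1) d) = l := by
  rw [pyRange_one_shift, List.map_map]
  have : ((fun t => PySem.List.pyGetD l (t - 1) d) ∘ (· + 1)) = fun j => PySem.List.pyGetD l j d := by
    funext j; simp
  rw [this]
  exact PySem.List.map_pyGetD_pyRange_zero l d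

lemma range1_countP {α : Type} (l : List α) (d : α) (p : α → Bool) :
    (PySem.List.pyRange 1 ((l.length : Int) + 1)).countP (fun t => p (PySem.List.pyGetD l (t - 1) d))
      = l.countP p := by
  have h := congrArg (List.countP p) (range1_map_get l d)
  rwa [List.countP_map] at h

lemma range1_flatMap {α β : Type} (l : List α) (d : α) (g : α → List β) :
    (PySem.List.pyRange 1 ((l.length : Int) + 1)).flatMap (fun t => g (PySem.List.pyGetD l (t - 1) d))
      = l.flatMap g := by
  have h := congrArg (List.flatMap g) (range1_map_get l d)
  rwa [List.flatMap_map] at h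

lemma countP_ne_add {α : Type} [DecidableEq α] (l : List α) (c : α) :
    l.countP (fun x => decide (c ≠ x)) + l.count c = l.length := by
  induction l with
  | nil => rfl
  | cons a t ih =>
      simp only [List.countP_cons, List.count_cons, List.length_cons]
      by_cases h : c = a
      · subst h
        simp at ih ⊢
        omega
      · simp [h, Ne.symm h] at ih ⊢
        omega

lemma repFold (c : Char) (k : Nat) (d : PySem.Dict Char Int) :
    (List.replicate k c).foldl (fun d x => d.insert x (d.getD x 0 + 1)) d
      = if k = 0 then d else d.insert c (d.getD c 0 + (k : Int)) := by
  induction k generalizing d with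
  | zero => rfl
  | succ k ih =>
      rw [List.replicate_succ, List.foldl_cons, ih]
      by_cases hk : k = 0
      · simp [hk]
      · simp only [hk, if_false, Nat.succ_ne_zero, PySem.Dict.getD_insert_self,
                   PySem.Dict.insert_insert_self]
        congr 1
        push_cast
        ring

lemma mainFold (F : Char → Nat) (l1 : List Char) (d : PySem.Dict Char Int) :
    (l1.flatMap (fun c => List.replicate (F c) c)).foldl
        (fun d x => d.insert x (d.getD x 0 + 1)) d
      = l1.foldl (fun d c => if 0 < ((F c : Int)) then d.insert c (d.getD c 0 + (F c : Int)) else d) d := by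
  induction l1 generalizing d with
  | nil => rfl
  | cons a t ih =>
      rw [List.flatMap_cons, List.foldl_append, List.foldl_cons, repFold]
      by_cases h : F a = 0
      · simp [h, ih]
      · have hp : (0 : Int) < (F a : Int) := by exact_mod_cast Nat.pos_of_ne_zero h
        rw [if_neg h, ih, if_pos hp]

-- ===== VERDICT (by name: the statement is the Claim_ definition above) =====
theorem get_sub_counts_spec : Claim_equal_get_sub_counts := by
  intro token1 token2 _
  unfold Spec_get_sub_counts get_sub_counts get_sub_counts_alt
  dsimp only
  set l1 := token1.toList
  set l2 := token2.toList
  set F : Char → Nat := fun c => l2.countP (fun x => decide (c ≠ x)) with hF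
  -- reduce A's nested loops to a flatMap of replicates
  have hinner : (fun (acc : List Char) (t1 : Int) =>
      (PySem.List.pyRange 1 ((l2.length : Int) + 1)).foldl
        (fun acc2 t2 =>
          if PySem.List.pyGetD l1 (t1 - 1) ' ' ≠ PySem.List.pyGetD l2 (t2 - 1) ' '
          then acc2 ++ [PySem.List.pyGetD l1 (t1 - 1) ' ']
          else acc2) acc)
      = fun acc t1 => acc ++ List.replicate (F (PySem.List.pyGetD l1 (t1 - 1) ' '))
                                            (PySem.List.pyGetD l1 (t1 - 1) ' ') := by
    funext acc t1
    rw [PySem.List.foldl_append_ite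
          (p := fun t2 => PySem.List.pyGetD l1 (t1 - 1) ' ' ≠ PySem.List.pyGetD l2 (t2 - 1) ' ')
          (f := fun _ => PySem.List.pyGetD l1 (t1 - 1) ' '),
        List.map_const', ← List.countP_eq_length_filter,
        range1_countP l2 ' ' (fun x => decide (PySem.List.pyGetD l1 (t1 - 1) ' ' ≠ x))]
  rw [hinner, PySem.List.foldl_append_eq_flatMap, List.nil_append,
      range1_flatMap l1 ' ' (fun c => List.replicate (F c) c),
      ← PySem.Dict.foldl_insert_getD_add_one_eq_counter, mainFold]
  -- B's fold computes the same function
  have hBfun : (fun (d : PySem.Dict Char Int) (c : Char) =>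
      let m := ((l2.length : Int)) - (PySem.Dict.counter l2).getD c 0
      if 0 < m then d.insert c (d.getD c 0 + m) else d)
      = fun d c => if 0 < ((F c : Int)) then d.insert c (d.getD c 0 + (F c : Int)) else d := by
    funext d c
    have hm : ((l2.length : Int)) - (PySem.Dict.counter l2).getD c 0 = (F c : Int) := by
      rw [PySem.Dict.getD_counter, hF]
      dsimp only
      have h := countP_ne_add l2 c
      omega
    simp only [hm]
  rw [hBfun]
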